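-- pv_equiv track=rewrite | github.com/Noeyso/Algorithm-Study | Programmers/큐,스택/숫자게임.py | solution
-- ===== SOURCE A (Python) =====
-- def solution(A, B):
--     cnt=0
--     A.sort()
--     B.sort()
--     for i in range(len(B)):
--         n1=A.pop()
--         n2=B.pop()
--         if n2>n1:
--             cnt+=1
--         else:
--             B.append(n2)
--
--     return cnt
-- ===== SOURCE B (Python) =====
-- def solution(A, B):
--     A.sort()
--     B.sort()
--     cand = A[len(A) - len(B):]
--     cnt = 0
--     for b in B:
--         if cnt < len(cand) and b > cand[cnt]:
--             cnt += 1
--     return cnt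
-- ===== Notes on version B (the rewrite author's own statement) =====
-- stated objective: simpler
-- what changed: Replaced the destructive largest-first pop/put-back loop over both lists with a non-destructive forward two-pointer scan: after sorting, walk B ascending and advance a single index into the candidate slice of A on each win.
-- outside the precondition, e.g. on solution([], [0]): A raises IndexError, B returns 0
import Mathlib
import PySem

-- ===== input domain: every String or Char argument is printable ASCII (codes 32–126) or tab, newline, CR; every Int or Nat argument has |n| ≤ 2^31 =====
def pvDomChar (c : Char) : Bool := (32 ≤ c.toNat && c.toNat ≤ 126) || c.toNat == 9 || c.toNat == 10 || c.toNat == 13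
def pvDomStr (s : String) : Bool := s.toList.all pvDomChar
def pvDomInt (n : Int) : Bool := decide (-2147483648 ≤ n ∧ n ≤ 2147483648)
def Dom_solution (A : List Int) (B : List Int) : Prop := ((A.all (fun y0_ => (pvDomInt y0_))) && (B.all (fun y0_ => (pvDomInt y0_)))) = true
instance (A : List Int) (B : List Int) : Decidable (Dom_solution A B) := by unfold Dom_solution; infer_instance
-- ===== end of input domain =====

-- B replaces A's destructive largest-first pop/put-back loop by a non-destructive forward
-- two-pointer scan over the sorted lists (objective: simpler). A mutates its arguments
-- (sorts both, pops A empty and partially consumes B); B only sorts them in place: the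
-- equivalence proved here is about the RETURN value only.

-- ===== PORT A =====
-- the for-loop: one iteration per element of range(len(B)); 'none' = IndexError from a pop on []
def solWalk : Nat → List Int → List Int → Int → Option Int
  | 0, _, _, cnt => some cnt
  | n + 1, as, bs, cnt =>
    match PySem.List.pop? as, PySem.List.pop? bs with
    | some (n1, as'), some (n2, bs') =>
      if n2 > n1 then solWalk n as' bs' (cnt + 1)
      else solWalk n as' (bs' ++ [n2]) cnt
    | _, _ => none

def solution (A : List Int) (B : List Int) : Int :=
  let sa := PySem.List.sorted A (fun x => x)
  let sb := PySem.List.sorted B (fun x => x)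
  (solWalk sb.length sa sb 0).getD 0

-- ===== PORT B =====
def solution_alt (A : List Int) (B : List Int) : Int :=
  let sa := PySem.List.sorted A (fun x => x)
  let sb := PySem.List.sorted B (fun x => x)
  let cand := PySem.List.slice sa (some ((sa.length : Int) - (sb.length : Int))) none
  ((sb.foldl (fun cnt b =>
      if h : cnt < cand.length then
        if b > cand[cnt] then cnt + 1 else cnt
      else cnt) 0 : Nat) : Int)

-- ===== PRECONDITION & SPEC =====
-- exactly where the Python A returns: the loop pops A once per element of B, so it raises
-- IndexError iff len(B) > len(A)
def Pre_solution (A : List Int) (B : List Int) : Prop := B.length ≤ A.length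
instance (A : List Int) (B : List Int) : Decidable (Pre_solution A B) := by unfold Pre_solution; infer_instance
def pvWitness_solution : List Int × List Int := ([1, 3, 2], [2, 4])

def Spec_solution (A : List Int) (B : List Int) (out : Int) : Prop := out = solution_alt A B
instance (A : List Int) (B : List Int) (out : Int) : Decidable (Spec_solution A B out) := by unfold Spec_solution; infer_instance

-- ===== CLAIM (what is proved, stated in full; the proofs are below) =====
def Claim_equal_solution : Prop := ∀ (A : List Int) (B : List Int), Dom_solution A B → Pre_solution A B → Spec_solution A B (solution A B)
-- ===== LEMMAS AND PROOFS =====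

-- G: two-pointer scan phrased as list recursion (proof-side abstraction of B's loop)
def G : List Int → List Int → Nat
  | _, [] => 0
  | [], _ :: bs => G [] bs
  | x :: xs, b :: bs => if b > x then G xs bs + 1 else G (x :: xs) bs
termination_by _ bs => bs.length

-- F: A's largest-first greedy on DESCENDING lists (proof-side abstraction of A's loop)
def F : List Int → List Int → Nat
  | [], _ => 0
  | _ :: _, [] => 0
  | a :: as, b :: bs => if b > a then F as bs + 1 else F as (b :: bs)

-- Fn: fueled variant of F, matching solWalk's range(len(B)) fuel
def Fn : Nat → List Int → List Int → Nat
  | 0, _, _ => 0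
  | _ + 1, [], _ => 0
  | _ + 1, _ :: _, [] => 0
  | n + 1, a :: as, b :: bs => if b > a then Fn n as bs + 1 else Fn n as (b :: bs)

theorem G_nil_left : ∀ bs : List Int, G [] bs = 0
  | [] => by simp [G]
  | _ :: bs => by simpa [G] using G_nil_left bs

-- appending one element at the far end of the A-side changes G only past position |as|
theorem G_append_min : ∀ (bs as : List Int) (a : Int),
    min (G (as ++ [a]) bs) as.length = G as bs := by
  intro bs
  induction bs with
  | nil => intro as a; simp [G]
  | cons y ys ih =>
    intro as a
    cases as with
    | nil => simp [G, G_nil_left]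
    | cons x xs =>
      simp only [List.cons_append, G]
      by_cases h : y > x
      · simp only [if_pos h, List.length_cons]
        have := ih xs a
        omega
      · simp only [if_neg h]
        exact ih (x :: xs) a

-- a B-element larger than everything on the A-side, processed last
theorem G_big_last : ∀ (bs X : List Int) (b : Int), (∀ x ∈ X, x < b) →
    G X (bs ++ [b]) = min (G X bs + 1) X.length := by
  intro bs
  induction bs with
  | nil =>
    intro X b hb
    cases X with
    | nil => simp [G]
    | cons x xs =>
      have hx : b > x := hb x (by simp)
      simp [G, if_pos hx]
  | cons y ys ih =>
    intro X b hb
    cases X with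
    | nil => simp [G_nil_left]
    | cons x xs =>
      simp only [List.cons_append, G]
      by_cases h : y > x
      · have := ih xs b (fun z hz => hb z (by simp [hz]))
        simp only [if_pos h, this, List.length_cons]
        omega
      · simp only [if_neg h]
        exact ih (x :: xs) b hb

-- an A-element at least everything on the B-side, placed at the far end, is never matched
theorem G_top_unmatched : ∀ (Y as : List Int) (a : Int), (∀ y ∈ Y, y ≤ a) →
    G (as ++ [a]) Y = G as Y := by
  intro Y
  induction Y with
  | nil => intro as a _; simp [G]
  | cons y ys ih =>
    intro as a ha
    have ha' : ∀ z ∈ ys, z ≤ a := fun z hz => ha z (by simp [hz])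
    cases as with
    | nil =>
      have hna : ¬ y > a := by have := ha y (by simp); omega
      simp only [List.nil_append, G, if_neg hna, G_nil_left]
      simpa [G_nil_left] using ih [] a ha'
    | cons x xs =>
      simp only [List.cons_append, G]
      by_cases h : y > x
      · simp only [if_pos h]
        rw [ih xs a ha']
      · simp only [if_neg h]
        exact ih (x :: xs) a ha'

-- the crux: A's descending greedy equals the ascending two-pointer count
theorem F_eq_G : ∀ (ra rb : List Int),
    ra.Pairwise (fun x y => y ≤ x) → rb.Pairwise (fun x y => y ≤ x) →
    F ra rb = G ra.reverse rb.reverse := by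
  intro ra
  induction ra with
  | nil => intro rb _ _; simp [F, G_nil_left]
  | cons a ras ih =>
    intro rb hra hrb
    cases rb with
    | nil => simp [F, G]
    | cons b rbs =>
      have hale : ∀ x ∈ ras, x ≤ a := (List.pairwise_cons.mp hra).1
      have hble : ∀ y ∈ rbs, y ≤ b := (List.pairwise_cons.mp hrb).1
      have hra' := (List.pairwise_cons.mp hra).2
      have hrb' := (List.pairwise_cons.mp hrb).2
      simp only [F, List.reverse_cons]
      by_cases h : b > a
      · simp only [if_pos h]
        rw [G_big_last rbs.reverse (ras.reverse ++ [a]) b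
              (by intro x hx; simp at hx
                  rcases hx with hx | hx
                  · exact lt_of_le_of_lt (hale x hx) h
                  · omega)]
        have hmin := G_append_min rbs.reverse ras.reverse a
        rw [ih rbs hra' hrb']
        simp only [List.length_append, List.length_reverse, List.length_singleton] at hmin ⊢
        omega
      · simp only [if_neg h]
        rw [G_top_unmatched (rbs.reverse ++ [b]) ras.reverse a
              (by intro y hy; simp at hy
                  rcases hy with hy | hy
                  · have := hble y hy; omega
                  · omega)]
        rw [ih (b :: rbs) hra' hrb]
        simp

-- fuel only ever reaches the first n elements of the A-side
theorem Fn_eq_F_take : ∀ (n : Nat) (ra rb : List Int), Fn n ra rb = F (ra.take n) rb := by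
  intro n
  induction n with
  | zero => intro ra rb; cases rb <;> simp [Fn, F]
  | succ n ih =>
    intro ra rb
    cases ra with
    | nil => cases rb <;> simp [Fn, F]
    | cons a ras =>
      cases rb with
      | nil => simp [Fn, F]
      | cons b rbs =>
        simp only [Fn, List.take_succ_cons, F]
        by_cases h : b > a
        · simp [if_pos h, ih]
        · simp [if_neg h, ih]

-- solWalk is Fn on the reversed lists (pop from the end = head of the reverse)
theorem solWalk_spec : ∀ (n : Nat) (ra rb : List Int) (cnt : Int),
    n ≤ ra.length → n ≤ rb.length →
    solWalk n ra.reverse rb.reverse cnt = some (cnt + (Fn n ra rb : Int)) := by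
  intro n
  induction n with
  | zero => intro ra rb cnt _ _; simp [solWalk, Fn]
  | succ n ih =>
    intro ra rb cnt hna hnb
    cases ra with
    | nil => simp at hna
    | cons a ras =>
      cases rb with
      | nil => simp at hnb
      | cons b rbs =>
        simp only [List.reverse_cons, solWalk, PySem.List.pop?_last]
        by_cases h : b > a
        · simp only [if_pos h]
          rw [ih ras rbs (cnt + 1) (by simpa using Nat.le_of_succ_le_succ hna)
                (by simpa using Nat.le_of_succ_le_succ hnb)]
          simp only [Fn, if_pos h]
          push_cast; ring_nf
        · simp only [if_neg h]
          have : rbs.reverse ++ [b] = (b :: rbs).reverse := by simp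
          rw [this, ih ras (b :: rbs) cnt (by simpa using Nat.le_of_succ_le_succ hna)
                (by simp at hnb ⊢; omega)]
          simp only [Fn, if_neg h]

-- B's indexed fold is G on the dropped candidate list
theorem altFold_spec : ∀ (bs : List Int) (cand : List Int) (cnt : Nat),
    bs.foldl (fun cnt b =>
      if h : cnt < cand.length then
        if b > cand[cnt] then cnt + 1 else cnt
      else cnt) cnt = cnt + G (cand.drop cnt) bs := by
  intro bs
  induction bs with
  | nil => intro cand cnt; simp [G]
  | cons b bs ih =>
    intro cand cnt
    simp only [List.foldl_cons]
    by_cases h : cnt < cand.length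
    · have hd : cand.drop cnt = cand[cnt] :: cand.drop (cnt + 1) :=
        List.drop_eq_getElem_cons h
      by_cases hb : b > cand[cnt]
      · simp only [dif_pos h, ih, hd, G, if_pos hb]
        omega
      · simp only [dif_pos h, ih, hd, G, if_neg hb]
    · have hd : cand.drop cnt = [] := List.drop_eq_nil_of_le (by omega)
      simp only [dif_neg h, ih, hd, G_nil_left]

theorem rev_sorted_pairwise (l : List Int) :
    (PySem.List.sorted l (fun x => x)).reverse.Pairwise (fun x y => y ≤ x) := by
  rw [List.pairwise_reverse]
  exact PySem.List.sorted_pairwise l (fun x => x)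

-- ===== VERDICT (by name: the statement is the Claim_ definition above) =====
theorem solution_spec : Claim_equal_solution := by
  intro A B _ hpre
  unfold Spec_solution solution solution_alt
  dsimp only
  set sa := PySem.List.sorted A (fun x => x) with hsa
  set sb := PySem.List.sorted B (fun x => x) with hsb
  have hlen : sb.length ≤ sa.length := by
    simpa [hsa, hsb, PySem.List.length_sorted] using hpre
  -- the slice is a drop
  have hslice : PySem.List.slice sa (some ((sa.length : Int) - (sb.length : Int))) none
      = sa.drop (sa.length - sb.length) := by
    rw [PySem.List.slice_from sa (by omega : (0:Int) ≤ (sa.length : Int) - (sb.length : Int))]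
    congr 1
    omega
  -- A side
  have hA : solWalk sb.length sa sb 0 = some ((Fn sb.length sa.reverse sb.reverse : Int)) := by
    have := solWalk_spec sb.length sa.reverse sb.reverse 0
      (by simpa using hlen) (by simp)
    simpa using this
  rw [hA, hslice, altFold_spec]
  simp only [List.drop_zero, Option.getD_some]
  rw [Fn_eq_F_take, F_eq_G (sa.reverse.take sb.length) sb.reverse
        ((rev_sorted_pairwise A).take) (rev_sorted_pairwise B)]
  rw [List.take_reverse, List.reverse_reverse, List.reverse_reverse]
  simp
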